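-- pv_equiv track=rewrite | github.com/funa68/AdventOfCode | 2020/Day5/day5.py | findBinSearchResult
-- ===== SOURCE A (Python) =====
-- from math import floor
--
-- def findBinSearchResult(line: str, inputIndex: int, leftVal: int, rightVal: int):
--     # look at each char and search thru start and end recursively
--
--     # calc midVal, floor to behave like 'int'
--     midVal = floor((rightVal + leftVal)/2)
--     retVal = 0
--
--     if(line[inputIndex] == 'F' or line[inputIndex] == 'L'):
--         # if char is F
--             # search left floor(midVal)
--         if(rightVal-leftVal > 1):
--             retVal = findBinSearchResult(line, inputIndex+1, leftVal, midVal)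
--         else:
--             retVal = leftVal
--
--     elif(line[inputIndex] == 'B' or line[inputIndex] == 'R'):
--         # if char is B
--             # search right floor(midVal)+1
--         if(rightVal-leftVal > 1):
--             retVal = findBinSearchResult(line, inputIndex+1, midVal+1, rightVal)
--         else:
--             retVal = rightVal
--     return retVal
-- ===== SOURCE B (Python) =====
-- def _step(state, c):
--     # one fold step: state is ('done', value) or ('open', lo, hi)
--     if state[0] == 'done':
--         return state
--     _, lo, hi = state
--     if c == 'F' or c == 'L':
--         return ('done', lo) if hi - lo <= 1 else ('open', lo, (hi + lo) // 2)
--     if c == 'B' or c == 'R':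
--         return ('done', hi) if hi - lo <= 1 else ('open', (hi + lo) // 2 + 1, hi)
--     return ('done', 0)
--
-- def findBinSearchResult(line: str, inputIndex: int, leftVal: int, rightVal: int):
--     # fold the step function over the remaining characters of the line
--     state = ('open', leftVal, rightVal)
--     for c in line[inputIndex:]:
--         state = _step(state, c)
--     return state[1] if state[0] == 'done' else 0
-- ===== Notes on version B (the rewrite author's own statement) =====
-- stated objective: alternative
-- what changed: Replaced the index-carrying tail recursion by a fold of a pure step function over the sliced remainder of the string, carrying an 'open window or done value' state instead of recursing with an index.
-- outside the precondition, e.g. on findBinSearchResult('R', -1, 3, 6): A returns 6, B returns 0; on findBinSearchResult('FX', 0, 0, 100): A returns 0, B returns 0; on findBinSearchResult('FF', -2, 0, 10): A returns 0, B returns 0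
import Mathlib
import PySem

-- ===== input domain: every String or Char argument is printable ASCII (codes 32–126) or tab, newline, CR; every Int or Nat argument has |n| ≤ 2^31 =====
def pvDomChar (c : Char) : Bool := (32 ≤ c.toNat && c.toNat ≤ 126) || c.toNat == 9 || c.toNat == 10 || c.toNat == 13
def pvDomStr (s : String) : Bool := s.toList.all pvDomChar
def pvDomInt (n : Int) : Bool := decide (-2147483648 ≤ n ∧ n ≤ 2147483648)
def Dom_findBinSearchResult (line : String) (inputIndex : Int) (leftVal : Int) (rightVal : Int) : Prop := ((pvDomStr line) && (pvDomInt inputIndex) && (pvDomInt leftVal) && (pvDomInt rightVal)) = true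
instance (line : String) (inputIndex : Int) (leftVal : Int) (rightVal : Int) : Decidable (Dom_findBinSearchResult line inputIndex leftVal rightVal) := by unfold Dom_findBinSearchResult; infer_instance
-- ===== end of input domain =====

-- B replaces A's index-carrying tail recursion by a fold of a pure step function over the
-- sliced remainder of the string (objective: alternative decomposition, same cost).

-- ===== PORT A =====
-- Python's floor((r+l)/2) is exact float arithmetic for |l|,|r| ≤ 2^31 (sum ≤ 2^33 < 2^53),
-- so it equals integer floor division, ported as PySem.Int.floordiv.
-- The recursion is ported structurally with a fuel counter that only makes it total: fuel starts
-- one above the window width (r-l).toNat and the width shrinks by at least 1 per recursive call,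
-- so the fuel-0 branch is never reached.
def pvRecA (line : String) (fuel : Nat) (inputIndex : Int) (leftVal : Int) (rightVal : Int) : Int :=
  match fuel with
  | 0 => 0   -- unreachable totality guard (see comment above)
  | fuel + 1 =>
    let midVal := PySem.Int.floordiv (rightVal + leftVal) 2
    match PySem.Str.pyGet? line inputIndex with
    | none => 0   -- Python raises IndexError here; such inputs are excluded by Pre_
    | some c =>
      if c = 'F' ∨ c = 'L' then
        if rightVal - leftVal > 1 then
          pvRecA line fuel (inputIndex + 1) leftVal midVal
        else leftVal
      else if c = 'B' ∨ c = 'R' then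
        if rightVal - leftVal > 1 then
          pvRecA line fuel (inputIndex + 1) (midVal + 1) rightVal
        else rightVal
      else 0

def findBinSearchResult (line : String) (inputIndex : Int) (leftVal : Int) (rightVal : Int) : Int :=
  pvRecA line ((rightVal - leftVal).toNat + 1) inputIndex leftVal rightVal

-- ===== PORT B =====
-- Source B's _step: state is Sum.inl value ('done') or Sum.inr (lo, hi) ('open')
def pvStep (st : Int ⊕ (Int × Int)) (c : Char) : Int ⊕ (Int × Int) :=
  match st with
  | Sum.inl v => Sum.inl v
  | Sum.inr (lo, hi) =>
    if c = 'F' ∨ c = 'L' then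
      if hi - lo ≤ 1 then Sum.inl lo else Sum.inr (lo, PySem.Int.floordiv (hi + lo) 2)
    else if c = 'B' ∨ c = 'R' then
      if hi - lo ≤ 1 then Sum.inl hi else Sum.inr (PySem.Int.floordiv (hi + lo) 2 + 1, hi)
    else Sum.inl 0

-- Source B's final read-off of the state
def pvFinish (st : Int ⊕ (Int × Int)) : Int :=
  match st with
  | Sum.inl v => v
  | Sum.inr _ => 0

-- the for-loop over line[inputIndex:] is the fold of pvStep over that slice
def findBinSearchResult_alt (line : String) (inputIndex : Int) (leftVal : Int) (rightVal : Int) : Int :=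
  pvFinish ((PySem.List.slice line.toList (some inputIndex) none).foldl pvStep (Sum.inr (leftVal, rightVal)))

-- ===== PRECONDITION & SPEC =====
-- Pre_ excludes the inputs on which A raises IndexError (index out of range now or during the
-- narrowing), and, being a conservative closed-form bound (width ≤ 2^(chars remaining) guarantees
-- the recursion cannot run off the end), it also excludes some inputs where A still returns: a
-- negative-wraparound start that recurses, and strings whose early non-'FLBR' character stops the
-- recursion before the too-short string is overrun (see cites).
-- index actually read first (Python negative indices count from the end)
def pvStartIdx (line : String) (inputIndex : Int) : Nat :=
  (if inputIndex < 0 then inputIndex + line.toList.length else inputIndex).toNat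

def Pre_findBinSearchResult (line : String) (inputIndex : Int) (leftVal : Int) (rightVal : Int) : Prop :=
  -(line.toList.length : Int) ≤ inputIndex ∧ inputIndex < line.toList.length ∧
  ((¬ (line.toList.getD (pvStartIdx line inputIndex) ' ' = 'F' ∨
       line.toList.getD (pvStartIdx line inputIndex) ' ' = 'L' ∨
       line.toList.getD (pvStartIdx line inputIndex) ' ' = 'B' ∨
       line.toList.getD (pvStartIdx line inputIndex) ' ' = 'R')) ∨
   rightVal - leftVal ≤ 1 ∨
   (0 ≤ inputIndex ∧ rightVal - leftVal ≤ 2 ^ (line.toList.length - 1 - pvStartIdx line inputIndex)))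
instance (line : String) (inputIndex : Int) (leftVal : Int) (rightVal : Int) : Decidable (Pre_findBinSearchResult line inputIndex leftVal rightVal) := by unfold Pre_findBinSearchResult; infer_instance

def pvWitness_findBinSearchResult : String × Int × Int × Int := ("FBFBBFFRLR", 0, 0, 127)

def Spec_findBinSearchResult (line : String) (inputIndex : Int) (leftVal : Int) (rightVal : Int) (out : Int) : Prop := out = findBinSearchResult_alt line inputIndex leftVal rightVal
instance (line : String) (inputIndex : Int) (leftVal : Int) (rightVal : Int) (out : Int) : Decidable (Spec_findBinSearchResult line inputIndex leftVal rightVal out) := by unfold Spec_findBinSearchResult; infer_instance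

-- ===== CLAIM (what is proved, stated in full; the proofs are below) =====
def Claim_equal_findBinSearchResult : Prop := ∀ (line : String) (inputIndex : Int) (leftVal : Int) (rightVal : Int), Dom_findBinSearchResult line inputIndex leftVal rightVal → Pre_findBinSearchResult line inputIndex leftVal rightVal → Spec_findBinSearchResult line inputIndex leftVal rightVal (findBinSearchResult line inputIndex leftVal rightVal)

-- ===== LEMMAS AND PROOFS =====

-- a 'done' state absorbs the rest of the fold
theorem pvStep_absorb (cs : List Char) (v : Int) :
    cs.foldl pvStep (Sum.inl v) = Sum.inl v := by
  induction cs with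
  | nil => rfl
  | cons c cs ih => simpa [pvStep] using ih

-- midpoint bracket: for lo < hi, lo ≤ (hi+lo)//2 < hi
theorem pvMid_bounds (lo hi : Int) (h : lo < hi) :
    lo ≤ PySem.Int.floordiv (hi + lo) 2 ∧ PySem.Int.floordiv (hi + lo) 2 < hi := by
  rw [PySem.Int.floordiv_eq_ediv_of_pos (by omega : (0:Int) < 2)]
  omega

-- core: for a nonnegative start index, A's fuelled recursion equals B's fold over the
-- dropped prefix, as long as the fuel exceeds the window width (which shrinks each step)
theorem pvRecA_eq_fold (line : String) :
    ∀ (fuel : Nat) (i l r : Int), 0 ≤ i → (r - l).toNat < fuel →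
      pvRecA line fuel i l r =
        pvFinish ((line.toList.drop i.toNat).foldl pvStep (Sum.inr (l, r))) := by
  intro fuel
  induction fuel with
  | zero => intro i l r _ h; omega
  | succ n ih =>
    intro i l r hi hfuel
    rw [pvRecA]
    simp only [PySem.Str.pyGet?_eq, PySem.Chars.pyGet?_eq_listPyGet?]
    have hls : line.toList.length = line.length := by simp
    have hidx : PySem.List.pyGet? line.toList i = line.toList[i.toNat]? := by
      by_cases h : i < (line.length : Int)
      · simp [PySem.List.pyGet?, PySem.List.pyIdx?, hi, h]
      · have hn : line.toList[i.toNat]? = none :=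
          List.getElem?_eq_none_iff.mpr (by omega)
        simp [PySem.List.pyGet?, PySem.List.pyIdx?, hi, h, hn]
    rw [hidx]
    cases hg : line.toList[i.toNat]? with
    | none =>
      have : line.toList.length ≤ i.toNat := List.getElem?_eq_none_iff.mp hg
      rw [List.drop_of_length_le this]
      rfl
    | some c =>
      have hlt : i.toNat < line.toList.length := by
        by_contra h
        rw [List.getElem?_eq_none_iff.mpr (by omega : line.toList.length ≤ i.toNat)] at hg
        simp at hg
      have hdrop : line.toList.drop i.toNat = c :: line.toList.drop (i.toNat + 1) := by
        rw [List.drop_eq_getElem_cons hlt]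
        simp [List.getElem?_eq_getElem hlt] at hg
        simp [hg]
      have hnext : (i + 1).toNat = i.toNat + 1 := by omega
      rw [hdrop]
      by_cases h1 : c = 'F' ∨ c = 'L'
      · by_cases hw : r - l > 1
        · obtain ⟨hm1, hm2⟩ := pvMid_bounds l r (by omega)
          have h' := ih (i + 1) l (PySem.Int.floordiv (r + l) 2) (by omega) (by omega)
          rw [hnext] at h'
          simpa [pvStep, h1, hw, show ¬ r - l ≤ 1 by omega] using h'
        · simp [pvStep, h1, hw, show r - l ≤ 1 by omega, pvStep_absorb, pvFinish]
      · by_cases h2 : c = 'B' ∨ c = 'R'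
        · by_cases hw : r - l > 1
          · obtain ⟨hm1, hm2⟩ := pvMid_bounds l r (by omega)
            have h' := ih (i + 1) (PySem.Int.floordiv (r + l) 2 + 1) r (by omega) (by omega)
            rw [hnext] at h'
            simpa [pvStep, h1, h2, hw, show ¬ r - l ≤ 1 by omega] using h'
          · simp [pvStep, h1, h2, hw, show r - l ≤ 1 by omega, pvStep_absorb, pvFinish]
        · simp [pvStep, h1, h2, pvStep_absorb, pvFinish]

-- ===== VERDICT (by name: the statement is the Claim_ definition above) =====
theorem findBinSearchResult_spec : Claim_equal_findBinSearchResult := by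
  intro line i l r _ hpre
  obtain ⟨hlo, hhi, hcase⟩ := hpre
  unfold Spec_findBinSearchResult findBinSearchResult findBinSearchResult_alt
  by_cases hi : 0 ≤ i
  · rw [PySem.List.slice_from _ hi]
    exact pvRecA_eq_fold line _ i l r hi (by omega)
  -- negative in-range start: Pre_ guarantees the first character already decides the result
  · push_neg at hi
    obtain ⟨k, hkpos, hik⟩ : ∃ k : Nat, 0 < k ∧ i = -(k : Int) := ⟨(-i).toNat, by omega, by omega⟩
    subst hik
    have hlen : k ≤ line.toList.length := by omega
    have hltlen : line.toList.length - k < line.toList.length := by omega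
    have hdropc : line.toList.drop (line.toList.length - k) =
        line.toList[line.toList.length - k] ::
          line.toList.drop (line.toList.length - k + 1) :=
      List.drop_eq_getElem_cons hltlen
    have hsl : PySem.List.slice line.toList (some (-(k : Int))) none =
        line.toList.drop (line.toList.length - k) :=
      PySem.List.slice_from_neg_natCast _ _ hkpos
    have hLL : line.toList.length = line.length := by simp
    have hget : PySem.List.pyGet? line.toList (-(k : Int)) =
        some (line.toList[line.toList.length - k]) := by
      have hn0 : ¬ (0 : Int) ≤ -(k : Int) := by omega
      have hnle : -((line.length : Int)) ≤ -(k : Int) := by omega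
      have hk0 : k ≠ 0 := by omega
      simp [PySem.List.pyGet?, PySem.List.pyIdx?, hn0, hnle, hk0,
        List.getElem?_eq_getElem (show line.length - k < line.toList.length by omega)]
    have hstart : pvStartIdx line (-(k : Int)) = line.toList.length - k := by
      unfold pvStartIdx
      simp [show -(k : Int) < 0 by omega]
      omega
    set c := line.toList[line.toList.length - k] with hc
    have hgetD : line.toList.getD (pvStartIdx line (-(k : Int))) ' ' = c := by
      rw [hstart, List.getD_eq_getElem _ _ hltlen]
    rw [pvRecA]
    simp only [PySem.Str.pyGet?_eq, PySem.Chars.pyGet?_eq_listPyGet?, hget, hsl, hdropc]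
    rcases hcase with hbad | hw | ⟨hipos, _⟩
    · rw [hgetD] at hbad
      push_neg at hbad
      obtain ⟨b1, b2, b3, b4⟩ := hbad
      simp [pvStep, b1, b2, b3, b4, pvStep_absorb, pvFinish]
    · by_cases h1 : c = 'F' ∨ c = 'L'
      · simp [pvStep, h1, show ¬ r - l > 1 by omega,
          show r - l ≤ 1 from hw, pvStep_absorb, pvFinish]
      · by_cases h2 : c = 'B' ∨ c = 'R'
        · simp [pvStep, h1, h2, show ¬ r - l > 1 by omega,
            show r - l ≤ 1 from hw, pvStep_absorb, pvFinish]
        · simp [pvStep, h1, h2, pvStep_absorb, pvFinish]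
    · omega
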